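-- pv_equiv track=rewrite | github.com/trevor-wieland/MTrainAI | playerclasses.py | can_play_on_single
-- ===== SOURCE A (Python) =====
-- def can_play_on_single(dominos, targets):
--     """
--     Checks to find all possible single domino plays that can play on the available targets
--     """
--     potential_plays = []
--     for target in targets:
--         for domino in dominos:
--             if domino[0] == domino[1]:
--                 continue
--             else:
--                 if domino[0] == target[1]:
--                     potential_plays.append((target, (domino[0], domino[1])))
--                 if domino[1] == target[1]:
--                     potential_plays.append((target, (domino[1], domino[0])))
--
--     return potential_plays
-- ===== SOURCE B (Python) =====
-- def can_play_on_single(dominos, targets):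
--     """
--     Checks to find all possible single domino plays that can play on the available targets
--     """
--     index = {}
--     for a, b in dominos:
--         if a != b:
--             index.setdefault(a, []).append((a, b))
--             index.setdefault(b, []).append((b, a))
--     potential_plays = []
--     for target in targets:
--         for play in index.get(target[1], []):
--             potential_plays.append((target, play))
--     return potential_plays
-- ===== Notes on version B (the rewrite author's own statement) =====
-- stated objective: faster
-- what changed: B builds a dict from pip value to the ordered oriented plays once, then each target is a single O(1) lookup instead of rescanning all dominoes per target.
import Mathlib
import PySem

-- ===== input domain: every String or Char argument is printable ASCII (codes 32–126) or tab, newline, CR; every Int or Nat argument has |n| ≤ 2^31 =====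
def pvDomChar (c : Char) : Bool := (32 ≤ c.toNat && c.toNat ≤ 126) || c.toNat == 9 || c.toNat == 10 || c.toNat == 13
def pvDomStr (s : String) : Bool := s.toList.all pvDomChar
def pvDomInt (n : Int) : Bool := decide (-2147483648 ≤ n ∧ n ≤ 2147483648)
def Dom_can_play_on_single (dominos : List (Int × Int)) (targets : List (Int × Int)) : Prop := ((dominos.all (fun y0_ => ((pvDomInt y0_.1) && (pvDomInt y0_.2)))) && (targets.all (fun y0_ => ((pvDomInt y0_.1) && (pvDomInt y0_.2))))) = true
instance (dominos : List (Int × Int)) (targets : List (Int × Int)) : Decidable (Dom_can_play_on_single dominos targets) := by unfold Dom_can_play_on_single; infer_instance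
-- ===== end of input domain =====

-- B replaces A's per-target scan of all dominoes by one dict from pip value to oriented plays,
-- then a single lookup per target (objective: faster, asymptotically).

-- ===== PORT A =====
def can_play_on_single (dominos : List (Int × Int)) (targets : List (Int × Int)) : List ((Int × Int) × (Int × Int)) :=
  targets.foldl (fun acc target =>
    dominos.foldl (fun acc domino =>
      if domino.1 = domino.2 then acc
      else
        let acc := if domino.1 = target.2 then acc ++ [(target, (domino.1, domino.2))] else acc
        if domino.2 = target.2 then acc ++ [(target, (domino.2, domino.1))] else acc) acc) []

-- ===== PORT B =====
def pvIndex (dominos : List (Int × Int)) : PySem.Dict Int (List (Int × Int)) :=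
  dominos.foldl (fun d p =>
    if p.1 = p.2 then d
    else (d.modify p.1 [] (· ++ [(p.1, p.2)])).modify p.2 [] (· ++ [(p.2, p.1)]))
    PySem.Dict.empty

def can_play_on_single_alt (dominos : List (Int × Int)) (targets : List (Int × Int)) : List ((Int × Int) × (Int × Int)) :=
  let index := pvIndex dominos
  targets.foldl (fun acc target =>
    acc ++ (index.getD target.2 []).map (fun play => (target, play))) []

-- ===== PRECONDITION & SPEC =====
def Spec_can_play_on_single (dominos : List (Int × Int)) (targets : List (Int × Int)) (out : List ((Int × Int) × (Int × Int))) : Prop := out = can_play_on_single_alt dominos targets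
instance (dominos : List (Int × Int)) (targets : List (Int × Int)) (out : List ((Int × Int) × (Int × Int))) : Decidable (Spec_can_play_on_single dominos targets out) := by unfold Spec_can_play_on_single; infer_instance

-- ===== CLAIM (what is proved, stated in full; the proofs are below) =====
def Claim_equal_can_play_on_single : Prop := ∀ (dominos : List (Int × Int)) (targets : List (Int × Int)), Dom_can_play_on_single dominos targets → Spec_can_play_on_single dominos targets (can_play_on_single dominos targets)

-- ===== LEMMAS AND PROOFS =====

/-- The oriented plays contributed for open end `v`, in domino order. -/
def pvMatches (dominos : List (Int × Int)) (v : Int) : List (Int × Int) :=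
  match dominos with
  | [] => []
  | d :: ds =>
    if d.1 = d.2 then pvMatches ds v
    else if d.1 = v then (d.1, d.2) :: pvMatches ds v
    else if d.2 = v then (d.2, d.1) :: pvMatches ds v
    else pvMatches ds v

theorem pvIndex_getD (dominos : List (Int × Int)) (v : Int) :
    ∀ d : PySem.Dict Int (List (Int × Int)),
      (dominos.foldl (fun d p =>
        if p.1 = p.2 then d
        else (d.modify p.1 [] (· ++ [(p.1, p.2)])).modify p.2 [] (· ++ [(p.2, p.1)])) d).getD v []
      = d.getD v [] ++ pvMatches dominos v := by
  induction dominos with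
  | nil => intro d; simp [pvMatches]
  | cons p ds ih =>
    intro d
    by_cases hpp : p.1 = p.2
    · simp [pvMatches, hpp, ih]
    · simp only [List.foldl_cons, if_neg hpp, ih, PySem.Dict.getD_modify]
      by_cases h2 : v = p.2
      · subst h2
        have hpp' : ¬ p.2 = p.1 := fun h => hpp h.symm
        simp [pvMatches, hpp, hpp']
      · by_cases h1 : v = p.1
        · subst h1
          simp [pvMatches, hpp]
        · have hp1 : ¬ p.1 = v := fun h => h1 h.symm
          have hp2 : ¬ p.2 = v := fun h => h2 h.symm
          simp [pvMatches, hpp, h1, h2, hp1, hp2]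

theorem pvIndex_eq (dominos : List (Int × Int)) (v : Int) :
    (pvIndex dominos).getD v [] = pvMatches dominos v := by
  simpa using pvIndex_getD dominos v PySem.Dict.empty

/-- A's inner loop over the dominoes appends exactly the indexed matches for the target's open end. -/
theorem pvInner (dominos : List (Int × Int)) (t : Int × Int) :
    ∀ acc : List ((Int × Int) × (Int × Int)),
      dominos.foldl (fun acc domino =>
        if domino.1 = domino.2 then acc
        else
          let acc := if domino.1 = t.2 then acc ++ [(t, (domino.1, domino.2))] else acc
          if domino.2 = t.2 then acc ++ [(t, (domino.2, domino.1))] else acc) acc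
      = acc ++ (pvMatches dominos t.2).map (fun play => (t, play)) := by
  induction dominos with
  | nil => intro acc; simp [pvMatches]
  | cons d ds ih =>
    intro acc
    by_cases hdd : d.1 = d.2
    · simp [pvMatches, hdd, ih]
    · by_cases h1 : d.1 = t.2
      · have h2 : ¬ d.2 = t.2 := fun h => hdd (h1.trans h.symm)
        simp only [List.foldl_cons, if_neg hdd, if_pos h1, if_neg h2, ih, pvMatches,
          List.map_cons, List.append_assoc, List.singleton_append]
      · by_cases h2 : d.2 = t.2
        · simp only [List.foldl_cons, if_neg hdd, if_neg h1, if_pos h2, ih, pvMatches,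
            List.map_cons, List.append_assoc, List.singleton_append]
        · simp [pvMatches, hdd, h1, h2, ih]

theorem pvOuter (dominos : List (Int × Int)) (targets : List (Int × Int)) :
    ∀ acc : List ((Int × Int) × (Int × Int)),
      targets.foldl (fun acc target =>
        dominos.foldl (fun acc domino =>
          if domino.1 = domino.2 then acc
          else
            let acc := if domino.1 = target.2 then acc ++ [(target, (domino.1, domino.2))] else acc
            if domino.2 = target.2 then acc ++ [(target, (domino.2, domino.1))] else acc) acc) acc
      = targets.foldl (fun acc target =>
          acc ++ ((pvIndex dominos).getD target.2 []).map (fun play => (target, play))) acc := by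
  induction targets with
  | nil => intro acc; rfl
  | cons t ts ih =>
    intro acc
    rw [List.foldl_cons, List.foldl_cons, pvInner, pvIndex_eq]
    exact ih _

-- ===== VERDICT (by name: the statement is the Claim_ definition above) =====
theorem can_play_on_single_spec : Claim_equal_can_play_on_single := by
  intro dominos targets _
  unfold Spec_can_play_on_single can_play_on_single can_play_on_single_alt
  exact pvOuter dominos targets []
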